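-- pv_equiv track=rewrite | github.com/diegofalves/Ominideck-Suit | ui/backend/writers.py | _iter_top_level_word_tokens
-- ===== SOURCE A (Python) =====
-- def _iter_top_level_word_tokens(sql: str):
--     """
--     Itera tokens de palavra no nível top-level do SQL (fora de strings, comentários e parênteses).
--     """
--     if not isinstance(sql, str):
--         return
--
--     length = len(sql)
--     idx = 0
--     paren_depth = 0
--     in_string = False
--     in_line_comment = False
--     in_block_comment = False
--
--     while idx < length:
--         char = sql[idx]
--         next_char = sql[idx + 1] if idx + 1 < length else ""
--
--         if in_line_comment:
--             if char in {"\n", "\r"}: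
--                 in_line_comment = False
--             idx += 1
--             continue
--
--         if in_block_comment:
--             if char == "*" and next_char == "/":
--                 in_block_comment = False
--                 idx += 2
--                 continue
--             idx += 1
--             continue
--
--         if in_string:
--             if char == "'" and next_char == "'":
--                 idx += 2
--                 continue
--             if char == "'":
--                 in_string = False
--             idx += 1
--             continue
--
--         if char == "-" and next_char == "-":
--             in_line_comment = True
--             idx += 2
--             continue
--
--         if char == "/" and next_char == "*":
--             in_block_comment = True
--             idx += 2
--             continue
--
--         if char == "'":
--             in_string = True
--             idx += 1
--             continue
--
--         if char == "(":
--             paren_depth += 1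
--             idx += 1
--             continue
--
--         if char == ")":
--             paren_depth = max(paren_depth - 1, 0)
--             idx += 1
--             continue
--
--         if paren_depth == 0 and (char.isalpha() or char == "_"):
--             start = idx
--             idx += 1
--             while idx < length:
--                 current = sql[idx]
--                 if current.isalnum() or current in {"_", "$", "#"}:
--                     idx += 1
--                     continue
--                 break
--             yield sql[start:idx].upper(), start, idx
--             continue
--
--         idx += 1
-- ===== SOURCE B (Python) =====
-- def _iter_top_level_word_tokens(sql):
--     """Lexeme-at-a-time tokenizer: consumes whole comments/strings/words in one
--     jump (str.find) instead of a char-by-char state machine with mode flags."""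
--     if not isinstance(sql, str):
--         return
--     n = len(sql)
--     i = 0
--     depth = 0
--     while i < n:
--         ch = sql[i]
--         if sql.startswith("--", i):
--             # jump to the end of the line comment (newline left for the skip branch)
--             i = min((p for p in (sql.find("\n", i), sql.find("\r", i)) if p != -1),
--                     default=n)
--         elif sql.startswith("/*", i):
--             j = sql.find("*/", i + 2)
--             i = n if j == -1 else j + 2
--         elif ch == "'":
--             i += 1
--             while True:
--                 j = sql.find("'", i)
--                 if j == -1:
--                     i = n
--                     break
--                 if sql[j + 1:j + 2] == "'":
--                     i = j + 2
--                 else: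
--                     i = j + 1
--                     break
--         elif ch == "(":
--             depth += 1
--             i += 1
--         elif ch == ")":
--             depth = max(depth - 1, 0)
--             i += 1
--         elif ch.isalpha() or ch == "_":
--             j = i + 1
--             while j < n and (sql[j].isalnum() or sql[j] in "_$#"):
--                 j += 1
--             if depth == 0:
--                 yield sql[i:j].upper(), i, j
--             i = j
--         else:
--             i += 1
-- ===== Notes on version B (the rewrite author's own statement) =====
-- stated objective: alternative
-- what changed: Replaced the char-by-char state machine with mode flags (in_string/in_line_comment/in_block_comment) by a lexeme-at-a-time tokenizer that consumes each comment, string or word in one jump using str.find/startswith and carries no mode state.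
import Mathlib
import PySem

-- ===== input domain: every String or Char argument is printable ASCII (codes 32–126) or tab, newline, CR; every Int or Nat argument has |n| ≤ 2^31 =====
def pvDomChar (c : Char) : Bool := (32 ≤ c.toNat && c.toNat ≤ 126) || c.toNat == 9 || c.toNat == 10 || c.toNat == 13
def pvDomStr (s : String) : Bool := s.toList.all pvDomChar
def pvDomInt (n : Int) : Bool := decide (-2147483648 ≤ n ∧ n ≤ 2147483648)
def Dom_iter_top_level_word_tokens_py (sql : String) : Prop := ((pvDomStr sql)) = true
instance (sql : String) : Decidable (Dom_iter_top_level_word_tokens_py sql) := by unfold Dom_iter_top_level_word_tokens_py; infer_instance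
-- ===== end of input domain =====

-- B tokenizes lexeme-at-a-time with no mode flags, A runs a char-by-char state machine; equal output (the generator's yields, as a list) is proved on all of Dom.

-- ===== PORT A =====
-- inner word-scan `while` of A: number of consecutive word-continuation chars
def wordScanA : List Char → Nat
  | [] => 0
  | c :: rest =>
    if PySem.Chars.isalnum c || c = '_' || c = '$' || c = '#' then wordScanA rest + 1 else 0

-- the main `while` of A: state = remaining chars, absolute index, paren depth, the three mode flags
def goA : List Char → Nat → Int → Bool → Bool → Bool → List (String × Int × Int)
  | [], _, _, _, _, _ => []
  | c :: rest, idx, paren, inStr, inLC, inBC =>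
    if inLC then
      if c = '\n' ∨ c = '\r' then goA rest (idx + 1) paren inStr false inBC
      else goA rest (idx + 1) paren inStr true inBC
    else if inBC then
      if c = '*' ∧ rest.head? = some '/' then goA (rest.drop 1) (idx + 2) paren inStr inLC false
      else goA rest (idx + 1) paren inStr inLC true
    else if inStr then
      if c = '\'' ∧ rest.head? = some '\'' then goA (rest.drop 1) (idx + 2) paren true inLC inBC
      else if c = '\'' then goA rest (idx + 1) paren false inLC inBC
      else goA rest (idx + 1) paren true inLC inBC
    else if c = '-' ∧ rest.head? = some '-' then goA (rest.drop 1) (idx + 2) paren inStr true inBC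
    else if c = '/' ∧ rest.head? = some '*' then goA (rest.drop 1) (idx + 2) paren inStr inLC true
    else if c = '\'' then goA rest (idx + 1) paren true inLC inBC
    else if c = '(' then goA rest (idx + 1) (paren + 1) inStr inLC inBC
    else if c = ')' then goA rest (idx + 1) (max (paren - 1) 0) inStr inLC inBC
    else if paren = 0 ∧ (PySem.Chars.isalpha c || c = '_') = true then
      let n := wordScanA rest
      (PySem.Str.upper (String.mk (c :: rest.take n)), (idx : Int), ((idx + 1 + n : Nat) : Int)) ::
        goA (rest.drop n) (idx + 1 + n) paren inStr inLC inBC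
    else goA rest (idx + 1) paren inStr inLC inBC
  termination_by cs => cs.length
  decreasing_by
    all_goals simp_all [List.length_drop]

-- generator port: list of yields; the isinstance guard is vacuous (sql : String)
def iter_top_level_word_tokens_py (sql : String) : List (String × Int × Int) :=
  goA sql.toList 0 0 false false false

-- ===== PORT B =====
-- length of `-- …` line-comment body (up to, not including, the newline; = the find-min jump in Source B)
def lcLenB (cs : List Char) : Nat := (cs.takeWhile (fun c => !(c = '\n' || c = '\r'))).length

-- chars consumed after `/*` up to and including `*/` (all of them if unterminated; = sql.find("*/") jump)
def bcLenB : List Char → Nat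
  | '*' :: '/' :: _ => 2
  | [] => 0
  | _ :: rest => bcLenB rest + 1

-- chars consumed after the opening `'` up to and including the closing `'`, skipping `''` pairs (= the find-loop in Source B)
def strLenB : List Char → Nat
  | '\'' :: '\'' :: rest => strLenB rest + 2
  | '\'' :: _ => 1
  | [] => 0
  | _ :: rest => strLenB rest + 1

-- length of the word-continuation run
def wordLenB (cs : List Char) : Nat :=
  (cs.takeWhile (fun c => PySem.Chars.isalnum c || c = '_' || c = '$' || c = '#')).length

-- the `while` of Source B: lexeme at a time, no mode flags
def goB : List Char → Nat → Int → List (String × Int × Int)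
  | [], _, _ => []
  | c :: rest, idx, depth =>
    if c = '-' ∧ rest.head? = some '-' then
      let k := lcLenB (rest.drop 1)
      goB ((rest.drop 1).drop k) (idx + 2 + k) depth
    else if c = '/' ∧ rest.head? = some '*' then
      let k := bcLenB (rest.drop 1)
      goB ((rest.drop 1).drop k) (idx + 2 + k) depth
    else if c = '\'' then
      let k := strLenB rest
      goB (rest.drop k) (idx + 1 + k) depth
    else if c = '(' then goB rest (idx + 1) (depth + 1)
    else if c = ')' then goB rest (idx + 1) (max (depth - 1) 0)
    else if (PySem.Chars.isalpha c || c = '_') = true then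
      let k := wordLenB rest
      if depth = 0 then
        (PySem.Str.upper (String.mk (c :: rest.take k)), (idx : Int), ((idx + 1 + k : Nat) : Int)) ::
          goB (rest.drop k) (idx + 1 + k) depth
      else goB (rest.drop k) (idx + 1 + k) depth
    else goB rest (idx + 1) depth
  termination_by cs => cs.length
  decreasing_by
    all_goals simp_all [List.length_drop]

def iter_top_level_word_tokens_py_alt (sql : String) : List (String × Int × Int) :=
  goB sql.toList 0 0

-- ===== PRECONDITION & SPEC =====
def Spec_iter_top_level_word_tokens_py (sql : String) (out : List (String × Int × Int)) : Prop := out = iter_top_level_word_tokens_py_alt sql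
instance (sql : String) (out : List (String × Int × Int)) : Decidable (Spec_iter_top_level_word_tokens_py sql out) := by unfold Spec_iter_top_level_word_tokens_py; infer_instance

-- ===== CLAIM (what is proved, stated in full; the proofs are below) =====
def Claim_equal_iter_top_level_word_tokens_py : Prop := ∀ (sql : String), Dom_iter_top_level_word_tokens_py sql → Spec_iter_top_level_word_tokens_py sql (iter_top_level_word_tokens_py sql)

-- ===== LEMMAS AND PROOFS =====

theorem wordLenB_le (cs : List Char) : wordLenB cs ≤ cs.length := by
  simpa [wordLenB] using (List.takeWhile_sublist (l := cs)
    (fun c => PySem.Chars.isalnum c || c = '_' || c = '$' || c = '#')).length_le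

-- one-step unfolding lemmas for the two loops (avoid cascading `simp [goA]` on literal lists)
theorem goA_cons_lc (c : Char) (rest : List Char) (idx : Nat) (p : Int) :
    goA (c :: rest) idx p false true false =
      if c = '\n' ∨ c = '\r' then goA rest (idx + 1) p false false false
      else goA rest (idx + 1) p false true false := by
  simp [goA]

theorem goA_cons_bc (c : Char) (rest : List Char) (idx : Nat) (p : Int) :
    goA (c :: rest) idx p false false true =
      if c = '*' ∧ rest.head? = some '/' then goA (rest.drop 1) (idx + 2) p false false false
      else goA rest (idx + 1) p false false true := by
  simp [goA]

theorem goA_cons_str (c : Char) (rest : List Char) (idx : Nat) (p : Int) :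
    goA (c :: rest) idx p true false false =
      if c = '\'' ∧ rest.head? = some '\'' then goA (rest.drop 1) (idx + 2) p true false false
      else if c = '\'' then goA rest (idx + 1) p false false false
      else goA rest (idx + 1) p true false false := by
  simp [goA]

theorem goA_cons_norm (c : Char) (rest : List Char) (idx : Nat) (p : Int) :
    goA (c :: rest) idx p false false false =
      if c = '-' ∧ rest.head? = some '-' then goA (rest.drop 1) (idx + 2) p false true false
      else if c = '/' ∧ rest.head? = some '*' then goA (rest.drop 1) (idx + 2) p false false true
      else if c = '\'' then goA rest (idx + 1) p true false false
      else if c = '(' then goA rest (idx + 1) (p + 1) false false false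
      else if c = ')' then goA rest (idx + 1) (max (p - 1) 0) false false false
      else if p = 0 ∧ (PySem.Chars.isalpha c || c = '_') = true then
        (PySem.Str.upper (String.mk (c :: rest.take (wordScanA rest))), (idx : Int),
          ((idx + 1 + wordScanA rest : Nat) : Int)) ::
          goA (rest.drop (wordScanA rest)) (idx + 1 + wordScanA rest) p false false false
      else goA rest (idx + 1) p false false false := by
  simp [goA]

theorem goB_cons (c : Char) (rest : List Char) (idx : Nat) (depth : Int) :
    goB (c :: rest) idx depth =
      if c = '-' ∧ rest.head? = some '-' then
        goB ((rest.drop 1).drop (lcLenB (rest.drop 1))) (idx + 2 + lcLenB (rest.drop 1)) depth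
      else if c = '/' ∧ rest.head? = some '*' then
        goB ((rest.drop 1).drop (bcLenB (rest.drop 1))) (idx + 2 + bcLenB (rest.drop 1)) depth
      else if c = '\'' then goB (rest.drop (strLenB rest)) (idx + 1 + strLenB rest) depth
      else if c = '(' then goB rest (idx + 1) (depth + 1)
      else if c = ')' then goB rest (idx + 1) (max (depth - 1) 0)
      else if (PySem.Chars.isalpha c || c = '_') = true then
        if depth = 0 then
          (PySem.Str.upper (String.mk (c :: rest.take (wordLenB rest))), (idx : Int),
            ((idx + 1 + wordLenB rest : Nat) : Int)) ::
            goB (rest.drop (wordLenB rest)) (idx + 1 + wordLenB rest) depth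
        else goB (rest.drop (wordLenB rest)) (idx + 1 + wordLenB rest) depth
      else goB rest (idx + 1) depth := by
  simp [goB]

theorem drop_len_le (n : Nat) (l : List Char) : (l.drop n).length ≤ l.length := by
  rw [List.length_drop]; omega

theorem wordScanA_eq (cs : List Char) : wordScanA cs = wordLenB cs := by
  induction cs with
  | nil => rfl
  | cons c rest ih =>
    simp only [wordScanA, wordLenB, List.takeWhile_cons] at *
    split <;> simp_all

theorem A_lc (cs : List Char) (idx : Nat) (p : Int) :
    goA cs idx p false true false =
      goA (cs.drop (lcLenB cs + 1)) (idx + (lcLenB cs + 1)) p false false false := by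
  induction cs generalizing idx with
  | nil => simp [goA]
  | cons c rest ih =>
    by_cases hnl : c = '\n' ∨ c = '\r'
    · have hl0 : lcLenB (c :: rest) = 0 := by
        rcases hnl with rfl | rfl <;> simp [lcLenB, List.takeWhile_cons]
      rw [goA_cons_lc, if_pos hnl, hl0]
      simp
    · have hA : ¬ c = '\n' := fun h => hnl (Or.inl h)
      have hB : ¬ c = '\r' := fun h => hnl (Or.inr h)
      have hl : lcLenB (c :: rest) = lcLenB rest + 1 := by
        simp [lcLenB, List.takeWhile_cons, hA, hB]
      rw [goA_cons_lc, if_neg hnl, hl, ih (idx + 1)]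
      have : idx + 1 + (lcLenB rest + 1) = idx + (lcLenB rest + 1 + 1) := by omega
      rw [this, List.drop_succ_cons]

theorem A_bc (cs : List Char) (idx : Nat) (p : Int) :
    goA cs idx p false false true =
      goA (cs.drop (bcLenB cs)) (idx + bcLenB cs) p false false false := by
  induction cs using bcLenB.induct generalizing idx with
  | case1 rest => rw [goA_cons_bc, if_pos ⟨rfl, rfl⟩]; rfl
  | case2 => simp [goA, bcLenB]
  | case3 c rest h ih =>
    have hne : ¬(c = '*' ∧ rest.head? = some '/') := by
      rintro ⟨rfl, hh⟩
      cases rest with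
      | nil => simp at hh
      | cons d r => simp at hh; subst hh; exact h r rfl rfl
    have hbc : bcLenB (c :: rest) = bcLenB rest + 1 := by
      rw [bcLenB.eq_def]
      split
      · rename_i tail heq
        injection heq with e1 e2
        exact (h tail e1 e2).elim
      · rename_i heq; exact absurd heq (by simp)
      · rename_i heq; injection heq with e1 e2; rw [e2]
    rw [goA_cons_bc, if_neg hne, hbc, ih (idx + 1)]
    have : idx + 1 + bcLenB rest = idx + (bcLenB rest + 1) := by omega
    rw [this, List.drop_succ_cons]

theorem A_str (cs : List Char) (idx : Nat) (p : Int) :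
    goA cs idx p true false false =
      goA (cs.drop (strLenB cs)) (idx + strLenB cs) p false false false := by
  induction cs using strLenB.induct generalizing idx with
  | case1 rest ih =>
    rw [goA_cons_str, if_pos ⟨rfl, rfl⟩]
    show goA rest (idx + 2) p true false false = _
    rw [ih (idx + 2)]
    have h2 : strLenB ('\'' :: '\'' :: rest) = strLenB rest + 2 := by simp [strLenB]
    rw [h2]
    have : idx + 2 + strLenB rest = idx + (strLenB rest + 2) := by omega
    rw [this, List.drop_succ_cons, List.drop_succ_cons]
  | case2 tail h =>
    have hne : ¬('\'' = '\'' ∧ tail.head? = some '\'') := by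
      rintro ⟨-, hh⟩
      cases tail with
      | nil => simp at hh
      | cons d r => simp at hh; subst hh; exact h r rfl
    have h1 : strLenB ('\'' :: tail) = 1 := by
      rw [strLenB.eq_def]
      split
      · rename_i r heq; injection heq with e1 e2; exact (h r e2).elim
      · rfl
      · rename_i heq; exact absurd heq (by simp)
      · rename_i hx hy heq; injection heq with e1 e2; exact (hy e1.symm).elim
    rw [goA_cons_str, if_neg hne, if_pos rfl, h1, List.drop_succ_cons, List.drop_zero]
  | case3 => simp [goA, strLenB]
  | case4 c rest h1 h2 ih =>
    have hc : ¬(c = '\'') := fun hh => h2 hh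
    have hne : ¬(c = '\'' ∧ rest.head? = some '\'') := fun hh => hc hh.1
    have hs : strLenB (c :: rest) = strLenB rest + 1 := by
      rw [strLenB.eq_def]
      split
      · rename_i r heq; injection heq with e1 e2; exact absurd e1 hc
      · rename_i hx heq; injection heq with e1 e2; exact absurd e1 hc
      · rename_i heq; exact absurd heq (by simp)
      · rename_i heq; injection heq with e1 e2; rw [e2]
    rw [goA_cons_str, if_neg hne, if_neg hc, hs, ih (idx + 1)]
    have : idx + 1 + strLenB rest = idx + (strLenB rest + 1) := by omega
    rw [this, List.drop_succ_cons]

theorem A_word_skip (w r : List Char) (idx : Nat) (p : Int) (hp : p ≠ 0) :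
    (∀ c ∈ w, (PySem.Chars.isalnum c || c = '_' || c = '$' || c = '#') = true) →
    goA (w ++ r) idx p false false false = goA r (idx + w.length) p false false false := by
  induction w generalizing idx with
  | nil => intro _; simp
  | cons c w' ih =>
    intro hw
    have hc := hw c (List.mem_cons_self ..)
    have h1 : c ≠ '-' := by rintro rfl; exact absurd hc (by decide)
    have h2 : c ≠ '/' := by rintro rfl; exact absurd hc (by decide)
    have h3 : c ≠ '\'' := by rintro rfl; exact absurd hc (by decide)
    have h4 : c ≠ '(' := by rintro rfl; exact absurd hc (by decide)
    have h5 : c ≠ ')' := by rintro rfl; exact absurd hc (by decide)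
    rw [List.cons_append, goA_cons_norm, if_neg (fun h => h1 h.1), if_neg (fun h => h2 h.1),
      if_neg h3, if_neg h4, if_neg h5, if_neg (fun h => hp h.1),
      ih (idx + 1) (fun c hc => hw c (List.mem_cons_of_mem _ hc))]
    have : idx + 1 + w'.length = idx + (c :: w').length := by simp; omega
    rw [this]

theorem B_lc_step (cs : List Char) (idx : Nat) (p : Int) :
    goB (cs.drop (lcLenB cs)) idx p = goB (cs.drop (lcLenB cs + 1)) (idx + 1) p := by
  induction cs generalizing idx with
  | nil => simp [goB]
  | cons c rest ih =>
    by_cases hnl : c = '\n' ∨ c = '\r'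
    · have h0 : lcLenB (c :: rest) = 0 := by
        rcases hnl with rfl | rfl <;> simp [lcLenB, List.takeWhile_cons]
      rw [h0, List.drop_zero, List.drop_succ_cons, List.drop_zero, goB_cons]
      rcases hnl with rfl | rfl <;>
        rw [if_neg (fun h => absurd h.1 (by decide)), if_neg (fun h => absurd h.1 (by decide)),
          if_neg (by decide), if_neg (by decide), if_neg (by decide), if_neg (by decide)]
    · have hA : ¬ c = '\n' := fun h => hnl (Or.inl h)
      have hB : ¬ c = '\r' := fun h => hnl (Or.inr h)
      have hl : lcLenB (c :: rest) = lcLenB rest + 1 := by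
        simp [lcLenB, List.takeWhile_cons, hA, hB]
      rw [hl, List.drop_succ_cons, List.drop_succ_cons, ih]

theorem take_wordLenB (cs : List Char) :
    cs.take (wordLenB cs) = cs.takeWhile (fun c => PySem.Chars.isalnum c || c = '_' || c = '$' || c = '#') := by
  exact (List.prefix_iff_eq_take.mp (List.takeWhile_prefix _)).symm

theorem mainAB : ∀ (n : Nat) (cs : List Char), cs.length ≤ n → ∀ (idx : Nat) (p : Int),
    goA cs idx p false false false = goB cs idx p := by
  intro n
  induction n with
  | zero =>
    intro cs hcs idx p
    rw [List.length_eq_zero_iff.mp (Nat.le_zero.mp hcs)]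
    simp [goA, goB]
  | succ n ih =>
    intro cs hcs idx p
    match cs with
    | [] => simp [goA, goB]
    | c :: rest =>
      simp only [List.length_cons, Nat.add_le_add_iff_right] at hcs
      rw [goA_cons_norm, goB_cons]
      by_cases h1 : c = '-' ∧ rest.head? = some '-'
      · rw [if_pos h1, if_pos h1, A_lc, B_lc_step]
        have harith : idx + 2 + (lcLenB (rest.drop 1) + 1) = idx + 2 + lcLenB (rest.drop 1) + 1 := by
          omega
        rw [harith]
        exact ih _ (le_trans (le_trans (drop_len_le _ _) (drop_len_le _ _)) hcs) _ _
      · rw [if_neg h1, if_neg h1]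
        by_cases h2 : c = '/' ∧ rest.head? = some '*'
        · rw [if_pos h2, if_pos h2, A_bc]
          exact ih _ (le_trans (le_trans (drop_len_le _ _) (drop_len_le _ _)) hcs) _ _
        · rw [if_neg h2, if_neg h2]
          by_cases h3 : c = '\''
          · rw [if_pos h3, if_pos h3, A_str]
            exact ih _ (le_trans (drop_len_le _ _) hcs) _ _
          · rw [if_neg h3, if_neg h3]
            by_cases h4 : c = '('
            · rw [if_pos h4, if_pos h4]; exact ih _ hcs _ _
            · rw [if_neg h4, if_neg h4]
              by_cases h5 : c = ')'
              · rw [if_pos h5, if_pos h5]; exact ih _ hcs _ _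
              · rw [if_neg h5, if_neg h5]
                by_cases h6 : (PySem.Chars.isalpha c || c = '_') = true
                · rw [if_pos h6]
                  by_cases hp : p = 0
                  · rw [if_pos ⟨hp, h6⟩, if_pos hp, wordScanA_eq,
                      ih _ (le_trans (drop_len_le _ _) hcs) _ _]
                  · rw [if_neg (fun h => hp h.1), if_neg hp]
                    conv_lhs => rw [← List.take_append_drop (wordLenB rest) rest]
                    have hlen : (List.take (wordLenB rest) rest).length = wordLenB rest := by
                      rw [List.length_take]
                      exact Nat.min_eq_left (wordLenB_le rest)
                    have hmem : ∀ d ∈ List.take (wordLenB rest) rest,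
                        (PySem.Chars.isalnum d || d = '_' || d = '$' || d = '#') = true := by
                      intro d hd
                      rw [take_wordLenB] at hd
                      simpa using List.mem_takeWhile_imp hd
                    rw [A_word_skip _ _ _ _ hp hmem, hlen]
                    exact ih _ (le_trans (drop_len_le _ _) hcs) _ _
                · rw [if_neg (fun h => h6 h.2), if_neg h6]
                  exact ih _ hcs _ _

-- ===== VERDICT (by name: the statement is the Claim_ definition above) =====
theorem iter_top_level_word_tokens_py_spec : Claim_equal_iter_top_level_word_tokens_py := by
  intro sql _
  unfold Spec_iter_top_level_word_tokens_py iter_top_level_word_tokens_py iter_top_level_word_tokens_py_alt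
  exact mainAB sql.toList.length sql.toList le_rfl 0 0
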